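-- pv_equiv track=rewrite | github.com/baroyurt/SW | Switchp/snmp_worker/scripts/sh_int_status_snmp.py | shorten_ifname
-- ===== SOURCE A (Python) =====
-- def shorten_ifname(name: str) -> str:
--     abbrevs = [
--         ("TenGigabitEthernet", "Te"),
--         ("GigabitEthernet",    "Gi"),
--         ("FastEthernet",       "Fa"),
--         ("Ethernet",           "Et"),
--     ]
--     for long, short in abbrevs:
--         if name.lower().startswith(long.lower()):
--             return short + name[len(long):]
--     return name
-- ===== SOURCE B (Python) =====
-- def shorten_ifname(name: str) -> str:
--     low = name.lower()
--     i = low.find("ethernet")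
--     if i >= 0:
--         short = {"tengigabit": "Te", "gigabit": "Gi", "fast": "Fa", "": "Et"}.get(low[:i])
--         if short is not None:
--             return short + name[i + 8:]
--     return name
-- ===== Notes on version B (the rewrite author's own statement) =====
-- stated objective: alternative
-- what changed: Instead of scanning four (long, short) pairs with case-insensitive startswith, B lowercases once, finds the single shared suffix 'ethernet', and looks the stem before it up in a dict keyed by lowercase stems.
import Mathlib
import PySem

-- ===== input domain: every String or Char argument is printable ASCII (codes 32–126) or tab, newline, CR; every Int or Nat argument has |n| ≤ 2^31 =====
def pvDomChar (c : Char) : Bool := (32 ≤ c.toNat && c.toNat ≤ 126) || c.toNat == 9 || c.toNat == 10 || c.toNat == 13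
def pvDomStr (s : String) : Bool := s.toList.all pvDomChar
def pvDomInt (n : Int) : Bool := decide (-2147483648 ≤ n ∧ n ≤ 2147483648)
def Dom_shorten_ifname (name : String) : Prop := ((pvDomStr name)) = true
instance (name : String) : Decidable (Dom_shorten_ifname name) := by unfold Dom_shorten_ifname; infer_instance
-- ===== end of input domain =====

-- B replaces A's four case-insensitive startswith scans by one find of the shared
-- suffix "ethernet" plus a dict lookup of the stem before it (objective: alternative).

-- ===== PORT A =====
def shortenLoop : List (String × String) → String → String
  | [], name => name
  | (long, short) :: rest, name =>
    if PySem.Str.startswith (PySem.Str.lower name) (PySem.Str.lower long) then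
      short ++ PySem.Str.slice name (some (PySem.Str.len long)) none
    else shortenLoop rest name

def shorten_ifname (name : String) : String :=
  shortenLoop
    [("TenGigabitEthernet", "Te"), ("GigabitEthernet", "Gi"),
     ("FastEthernet", "Fa"), ("Ethernet", "Et")] name

-- ===== PORT B =====
def shorten_ifname_alt (name : String) : String :=
  let low := PySem.Str.lower name
  let i := PySem.Str.find low "ethernet"
  if 0 ≤ i then
    match (PySem.Dict.ofList
        [("tengigabit", "Te"), ("gigabit", "Gi"), ("fast", "Fa"), ("", "Et")]
        : PySem.Dict String String).get? (PySem.Str.slice low none (some i)) with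
    | some short => short ++ PySem.Str.slice name (some (i + 8)) none
    | none => name
  else name

-- ===== PRECONDITION & SPEC =====
def Spec_shorten_ifname (name : String) (out : String) : Prop := out = shorten_ifname_alt name
instance (name : String) (out : String) : Decidable (Spec_shorten_ifname name out) := by unfold Spec_shorten_ifname; infer_instance

-- ===== CLAIM (what is proved, stated in full; the proofs are below) =====
def Claim_equal_shorten_ifname : Prop := ∀ (name : String), Dom_shorten_ifname name → Spec_shorten_ifname name (shorten_ifname name)

-- ===== LEMMAS AND PROOFS =====

-- a prefix that still fits inside the left part of an append is a prefix of that part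
theorem pv_prefix_of_prefix_append {α : Type} (p a b : List α)
    (h : p <+: a ++ b) (hl : p.length ≤ a.length) : p <+: a := by
  have h1 : (a ++ b).take p.length = p := by
    obtain ⟨r, hr⟩ := h
    rw [← hr, List.take_left]
  rw [List.take_append_of_le_length hl] at h1
  exact h1 ▸ List.take_prefix _ _

-- if stem ++ "ethernet" is a prefix of l and "ethernet" occurs nowhere earlier inside
-- that prefix, then find points exactly at stem.length
theorem pv_find_of_stem (l stem : List Char)
    (hno : ∀ j, j < stem.length → ¬ ("ethernet".toList <+: (stem ++ "ethernet".toList).drop j))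
    (hpre : (stem ++ "ethernet".toList) <+: l) :
    PySem.Chars.find l "ethernet".toList = (stem.length : Int) := by
  obtain ⟨r, hr⟩ := hpre
  have hinf : "ethernet".toList <:+: l := ⟨stem, r, hr⟩
  have h0 : 0 ≤ PySem.Chars.find l "ethernet".toList :=
    (PySem.Chars.find_nonneg_iff _ _).mpr hinf
  obtain ⟨h1, h2⟩ := PySem.Chars.find_spec h0
  set j₀ := (PySem.Chars.find l "ethernet".toList).toNat with hj
  have hdropstem : l.drop stem.length = "ethernet".toList ++ r := by
    rw [← hr, List.append_assoc, List.drop_left]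
  have hle : j₀ ≤ stem.length := by
    by_contra hlt
    push Not at hlt
    exact h2 stem.length hlt (hdropstem ▸ List.prefix_append _ _)
  have hge : stem.length ≤ j₀ := by
    by_contra hlt
    push Not at hlt
    apply hno j₀ hlt
    have hsub : l.drop j₀ = (stem ++ "ethernet".toList).drop j₀ ++ r := by
      rw [← hr, List.drop_append_of_le_length]
      simp [List.length_append]
      omega
    rw [hsub] at h1
    refine pv_prefix_of_prefix_append _ _ _ h1 ?_
    simp [List.length_append]
    omega
  have hj0 : j₀ = stem.length := le_antisymm hle hge
  have := Int.toNat_of_nonneg h0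
  omega

-- find's witness: the text before the found occurrence, followed by "ethernet", is a prefix
theorem pv_stem_prefix (l : List Char) (h0 : 0 ≤ PySem.Chars.find l "ethernet".toList) :
    l.take (PySem.Chars.find l "ethernet".toList).toNat ++ "ethernet".toList <+: l := by
  obtain ⟨h1, -⟩ := PySem.Chars.find_spec h0
  obtain ⟨r, hr⟩ := h1
  exact ⟨r, by rw [List.append_assoc, hr, List.take_append_drop]⟩

theorem pv_take_of_pre (l stem : List Char)
    (hpre : (stem ++ "ethernet".toList) <+: l) : l.take stem.length = stem := by
  have h : stem <+: l := (List.prefix_append stem _).trans hpre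
  exact (List.prefix_iff_eq_take.mp h).symm

-- A's startswith test, read on the lowered character list
theorem pv_sw (name long : String) (llong : List Char)
    (h : PySem.Chars.lower long.toList = llong) :
    (PySem.Str.startswith (PySem.Str.lower name) (PySem.Str.lower long) = true)
      ↔ llong <+: PySem.Chars.lower name.toList := by
  rw [PySem.Str.startswith_eq, PySem.Str.toList_lower, PySem.Str.toList_lower, h,
    PySem.Chars.startswith_iff]

-- evaluation of B when find hits stem.length and the stem is in the table
theorem pv_B_of_stem (name : String) (stem : List Char) (short : String)
    (hfind : PySem.Chars.find (PySem.Chars.lower name.toList) "ethernet".toList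
      = (stem.length : Int))
    (htake : (PySem.Chars.lower name.toList).take stem.length = stem)
    (hget : (PySem.Dict.ofList
        [("tengigabit", "Te"), ("gigabit", "Gi"), ("fast", "Fa"), ("", "Et")]
        : PySem.Dict String String).get? (String.ofList stem) = some short) :
    shorten_ifname_alt name
      = short ++ PySem.Str.slice name (some ((stem.length : Int) + 8)) none := by
  have hf : PySem.Str.find (PySem.Str.lower name) "ethernet" = (stem.length : Int) := by
    rw [PySem.Str.find_eq, PySem.Str.toList_lower]
    exact hfind
  have hkey : PySem.Str.slice (PySem.Str.lower name) none (some ((stem.length : Int)))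
      = String.ofList stem := by
    simp only [PySem.Str.slice, PySem.Str.toList_lower, PySem.Chars.slice_eq_listSlice,
      PySem.List.slice_to_natCast, htake]
  simp only [shorten_ifname_alt, hf, hkey, hget]
  rw [if_pos (by positivity)]

theorem shorten_ifname_eq (name : String) : shorten_ifname name = shorten_ifname_alt name := by
  set l := PySem.Chars.lower name.toList with hl
  by_cases h1 : "tengigabitethernet".toList <+: l
  · have hpre : ("tengigabit".toList ++ "ethernet".toList) <+: l := by
      have : "tengigabit".toList ++ "ethernet".toList = "tengigabitethernet".toList := by decide
      rw [this]; exact h1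
    rw [pv_B_of_stem name "tengigabit".toList "Te"
      (pv_find_of_stem l _ (by decide) hpre) (pv_take_of_pre l _ hpre) (by decide)]
    simp only [shorten_ifname, shortenLoop]
    rw [if_pos ((pv_sw name "TenGigabitEthernet" "tengigabitethernet".toList (by decide)).mpr h1)]
    have : PySem.Str.len "TenGigabitEthernet" = (("tengigabit".toList.length : Int) + 8) := by decide
    rw [this]
  · by_cases h2 : "gigabitethernet".toList <+: l
    · have hpre : ("gigabit".toList ++ "ethernet".toList) <+: l := by
        have : "gigabit".toList ++ "ethernet".toList = "gigabitethernet".toList := by decide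
        rw [this]; exact h2
      rw [pv_B_of_stem name "gigabit".toList "Gi"
        (pv_find_of_stem l _ (by decide) hpre) (pv_take_of_pre l _ hpre) (by decide)]
      simp only [shorten_ifname, shortenLoop]
      rw [if_neg (by rw [pv_sw name "TenGigabitEthernet" "tengigabitethernet".toList (by decide)]; exact h1)]
      rw [if_pos ((pv_sw name "GigabitEthernet" "gigabitethernet".toList (by decide)).mpr h2)]
      have : PySem.Str.len "GigabitEthernet" = (("gigabit".toList.length : Int) + 8) := by decide
      rw [this]
    · by_cases h3 : "fastethernet".toList <+: l
      · have hpre : ("fast".toList ++ "ethernet".toList) <+: l := by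
          have : "fast".toList ++ "ethernet".toList = "fastethernet".toList := by decide
          rw [this]; exact h3
        rw [pv_B_of_stem name "fast".toList "Fa"
          (pv_find_of_stem l _ (by decide) hpre) (pv_take_of_pre l _ hpre) (by decide)]
        simp only [shorten_ifname, shortenLoop]
        rw [if_neg (by rw [pv_sw name "TenGigabitEthernet" "tengigabitethernet".toList (by decide)]; exact h1)]
        rw [if_neg (by rw [pv_sw name "GigabitEthernet" "gigabitethernet".toList (by decide)]; exact h2)]
        rw [if_pos ((pv_sw name "FastEthernet" "fastethernet".toList (by decide)).mpr h3)]
        have : PySem.Str.len "FastEthernet" = (("fast".toList.length : Int) + 8) := by decide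
        rw [this]
      · by_cases h4 : "ethernet".toList <+: l
        · have hpre : (([] : List Char) ++ "ethernet".toList) <+: l := by
            rw [List.nil_append]; exact h4
          rw [pv_B_of_stem name [] "Et"
            (pv_find_of_stem l _ (by simp) hpre) (by simp) (by decide)]
          simp only [shorten_ifname, shortenLoop]
          rw [if_neg (by rw [pv_sw name "TenGigabitEthernet" "tengigabitethernet".toList (by decide)]; exact h1)]
          rw [if_neg (by rw [pv_sw name "GigabitEthernet" "gigabitethernet".toList (by decide)]; exact h2)]
          rw [if_neg (by rw [pv_sw name "FastEthernet" "fastethernet".toList (by decide)]; exact h3)]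
          rw [if_pos ((pv_sw name "Ethernet" "ethernet".toList (by decide)).mpr h4)]
          have : PySem.Str.len "Ethernet" = ((([] : List Char).length : Int) + 8) := by decide
          rw [this]
        · -- no long name matches: A returns name; show B does too
          have hA : shorten_ifname name = name := by
            simp only [shorten_ifname, shortenLoop]
            rw [if_neg (by rw [pv_sw name "TenGigabitEthernet" "tengigabitethernet".toList (by decide)]; exact h1)]
            rw [if_neg (by rw [pv_sw name "GigabitEthernet" "gigabitethernet".toList (by decide)]; exact h2)]
            rw [if_neg (by rw [pv_sw name "FastEthernet" "fastethernet".toList (by decide)]; exact h3)]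
            rw [if_neg (by rw [pv_sw name "Ethernet" "ethernet".toList (by decide)]; exact h4)]
          rw [hA]
          have hfind : PySem.Str.find (PySem.Str.lower name) "ethernet"
              = PySem.Chars.find l "ethernet".toList := by
            rw [PySem.Str.find_eq, PySem.Str.toList_lower]
          by_cases hpos : 0 ≤ PySem.Chars.find l "ethernet".toList
          · -- the found stem is none of the four table keys
            have hstem := pv_stem_prefix l hpos
            set j₀ := (PySem.Chars.find l "ethernet".toList).toNat with hj
            have hb : PySem.Chars.find l "ethernet".toList = ((j₀ : Nat) : Int) :=
              (Int.toNat_of_nonneg hpos).symm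
            have hkey : PySem.Str.slice (PySem.Str.lower name) none
                (some (PySem.Chars.find l "ethernet".toList))
                = String.ofList (l.take j₀) := by
              simp only [PySem.Str.slice, PySem.Str.toList_lower, ← hl,
                PySem.Chars.slice_eq_listSlice, hb, PySem.List.slice_to_natCast]
            have hne : ∀ stem : List Char,
                (stem ++ "ethernet".toList <+: l → False) →
                ¬ String.ofList (l.take j₀) = String.ofList stem := by
              intro stem hbad heq
              have : l.take j₀ = stem := by
                have := congrArg String.toList heq
                simpa using this
              exact hbad (this ▸ hstem)
            have hget : (PySem.Dict.ofList
                [("tengigabit", "Te"), ("gigabit", "Gi"), ("fast", "Fa"), ("", "Et")]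
                : PySem.Dict String String).get? (String.ofList (l.take j₀)) = none := by
              have k1 := hne "tengigabit".toList (fun hb => h1 (by
                have : "tengigabit".toList ++ "ethernet".toList = "tengigabitethernet".toList := by decide
                rw [← this]; exact hb))
              have k2 := hne "gigabit".toList (fun hb => h2 (by
                have : "gigabit".toList ++ "ethernet".toList = "gigabitethernet".toList := by decide
                rw [← this]; exact hb))
              have k3 := hne "fast".toList (fun hb => h3 (by
                have : "fast".toList ++ "ethernet".toList = "fastethernet".toList := by decide
                rw [← this]; exact hb))
              have k4 := hne [] (fun hb => h4 (by
                have : ([] : List Char) ++ "ethernet".toList = "ethernet".toList := by simp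
                rw [← this]; exact hb))
              have e1 : ("tengigabit" : String) = String.ofList "tengigabit".toList := by decide
              have e2 : ("gigabit" : String) = String.ofList "gigabit".toList := by decide
              have e3 : ("fast" : String) = String.ofList "fast".toList := by decide
              have e4 : ("" : String) = String.ofList ([] : List Char) := by decide
              have n1 : ¬ (("tengigabit" : String) = String.ofList (l.take j₀)) :=
                fun h => k1 (by rw [e1] at h; exact h.symm)
              have n2 : ¬ (("gigabit" : String) = String.ofList (l.take j₀)) :=
                fun h => k2 (by rw [e2] at h; exact h.symm)
              have n3 : ¬ (("fast" : String) = String.ofList (l.take j₀)) :=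
                fun h => k3 (by rw [e3] at h; exact h.symm)
              have n4 : ¬ (("" : String) = String.ofList (l.take j₀)) :=
                fun h => k4 (by rw [e4] at h; exact h.symm)
              have hdict : (PySem.Dict.ofList
                  [("tengigabit", "Te"), ("gigabit", "Gi"), ("fast", "Fa"), ("", "Et")]
                  : PySem.Dict String String)
                  = PySem.Dict.mk
                    [("tengigabit", "Te"), ("gigabit", "Gi"), ("fast", "Fa"), ("", "Et")] := by
                decide
              rw [hdict]
              simp only [PySem.Dict.get?_mk_cons]
              rw [if_neg (by simpa using n1), if_neg (by simpa using n2),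
                if_neg (by simpa using n3), if_neg (by simpa using n4)]
              rfl
            simp only [shorten_ifname_alt, hfind, hkey, hget]
            rw [if_pos hpos]
          · simp only [shorten_ifname_alt, hfind]
            rw [if_neg hpos]

-- ===== VERDICT (by name: the statement is the Claim_ definition above) =====
theorem shorten_ifname_spec : Claim_equal_shorten_ifname := by
  intro name _
  unfold Spec_shorten_ifname
  exact shorten_ifname_eq name
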